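-- pv_equiv track=rewrite | github.com/KoMinjae/codingtest | 백만장자프로젝트.py | solution
-- ===== SOURCE A (Python) =====
-- def solution(value):
--     answer=0
--     while True:
--         maxcost = max(value)
--         maxcostidx = value.index(max(value))
--         if maxcostidx == len(value)-1:
--             for i in value:
--                 answer += maxcost-i
--             return answer
--         elif maxcostidx == 0:
--             value=value[1::]
--             continue
--         else:
--             for i in range(0,maxcostidx):
--                 answer+= maxcost-value[i]
--         value=value[maxcostidx+1::]
-- ===== SOURCE B (Python) =====
-- def solution(value):
--     answer = 0
--     mx = None
--     for v in reversed(value):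
--         if mx is None or v > mx:
--             mx = v
--         answer += mx - v
--     return answer
-- ===== Notes on version B (the rewrite author's own statement) =====
-- stated objective: faster
-- what changed: A repeatedly recomputes max() and index() and reslices the list (quadratic); B is a single right-to-left pass keeping the running maximum and adding max-price each step. Pre_ excludes only the empty list, on which A raises ValueError.
import Mathlib
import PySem

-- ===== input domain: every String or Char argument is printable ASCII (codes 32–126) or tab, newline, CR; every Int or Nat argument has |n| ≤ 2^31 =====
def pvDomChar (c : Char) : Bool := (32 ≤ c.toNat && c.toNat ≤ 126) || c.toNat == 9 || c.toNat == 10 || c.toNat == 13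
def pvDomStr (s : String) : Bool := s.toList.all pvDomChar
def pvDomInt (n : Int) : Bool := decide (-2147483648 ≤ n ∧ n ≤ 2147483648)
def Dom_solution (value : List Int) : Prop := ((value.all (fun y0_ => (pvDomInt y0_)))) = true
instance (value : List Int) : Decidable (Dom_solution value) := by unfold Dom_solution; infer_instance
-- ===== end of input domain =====

-- B replaces A's repeated max/index/slice scans by one right-to-left pass with a running maximum (asymptotically faster in a timing run).


-- ===== PORT A =====
-- the 'while True' loop; terminates because value strictly shrinks on every iteration
def solutionLoop (answer : Int) (value : List Int) : Int :=
  match hm : PySem.List.max? value (fun x => x) with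
  | none => 0  -- Python raises ValueError here (max of empty sequence); excluded by Pre_
  | some maxcost =>
    match hi : PySem.List.index? value maxcost with
    | none => 0  -- unreachable: maxcost ∈ value
    | some maxcostidx =>
      if maxcostidx = value.length - 1 then
        value.foldl (fun a i => a + (maxcost - i)) answer
      else if maxcostidx = 0 then
        solutionLoop answer (PySem.List.slice value (some 1) none)
      else
        solutionLoop
          ((PySem.List.pyRange 0 (maxcostidx : Int) 1).foldl
            (fun a i => a + (maxcost - PySem.List.pyGetD value i 0)) answer)
          (PySem.List.slice value (some ((maxcostidx : Int) + 1)) none)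
termination_by value.length
decreasing_by
  · have hne : value ≠ [] := by
      intro h; subst h; simp [PySem.List.max?] at hm
    simp [PySem.List.slice_from_one]
    cases value with
    | nil => exact absurd rfl hne
    | cons a t => simp
  · have hlt : maxcostidx < value.length := by
      obtain ⟨hk, _, _⟩ := PySem.List.getElem_of_index?_eq_some hi
      exact hk
    have : ((maxcostidx : Int) + 1) = ((maxcostidx + 1 : Nat) : Int) := by push_cast; ring
    rw [this, PySem.List.slice_from_natCast]
    simp [List.length_drop]
    omega

def solution (value : List Int) : Int := solutionLoop 0 value

-- ===== PORT B =====
def solution_alt (value : List Int) : Int :=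
  (value.reverse.foldl
    (fun (st : Int × Option Int) v =>
      let mx := match st.2 with
        | none => v
        | some m => if v > m then v else m
      (st.1 + (mx - v), some mx))
    (0, none)).1

-- ===== PRECONDITION & SPEC =====
-- Pre_ excludes exactly the empty list, on which Python A raises ValueError (max of empty sequence).
def Pre_solution (value : List Int) : Prop := value ≠ []
instance (value : List Int) : Decidable (Pre_solution value) := by unfold Pre_solution; infer_instance
def pvWitness_solution : List Int := ([1, 3, 2])

def Spec_solution (value : List Int) (out : Int) : Prop := out = solution_alt value
instance (value : List Int) (out : Int) : Decidable (Spec_solution value out) := by unfold Spec_solution; infer_instance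

-- ===== CLAIM (what is proved, stated in full; the proofs are below) =====
def Claim_equal_solution : Prop := ∀ (value : List Int), Dom_solution value → Pre_solution value → Spec_solution value (solution value)

-- ===== LEMMAS AND PROOFS =====

-- sum over both: the "answer" each element contributes is (max of its suffix) - itself
def sufMax : List Int → Int
  | [] => 0
  | v :: t => t.foldl max v

def sret : List Int → Int
  | [] => 0
  | v :: t => (sufMax (v :: t) - v) + sret t

theorem foldl_max_comm (l : List Int) (a b : Int) :
    l.foldl max (max a b) = max a (l.foldl max b) := by
  induction l generalizing b with
  | nil => simp
  | cons c t ih => simp only [List.foldl_cons, max_assoc, ih]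

theorem foldl_max_of_le (t : List Int) (v : Int) (h : ∀ y ∈ t, y ≤ v) :
    t.foldl max v = v := by
  induction t with
  | nil => rfl
  | cons u t ih =>
    have hu : u ≤ v := h u (by simp)
    simp only [List.foldl_cons, max_eq_left hu]
    exact ih (fun y hy => h y (by simp [hy]))

theorem foldl_max_of_mem (t : List Int) (m v : Int) (hm : m ∈ t)
    (hle : ∀ y ∈ t, y ≤ m) (hv : v ≤ m) : t.foldl max v = m := by
  induction t generalizing v with
  | nil => cases hm
  | cons u t ih =>
    simp only [List.foldl_cons]
    rcases List.mem_cons.mp hm with h | h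
    · subst h
      rw [max_eq_right hv]
      exact foldl_max_of_le t m (fun y hy => hle y (by simp [hy]))
    · exact ih (max v u) h (fun y hy => hle y (by simp [hy])) (max_le hv (hle u (by simp)))

theorem addFold (m : Int) (l : List Int) (a : Int) :
    l.foldl (fun acc x => acc + (m - x)) a = a + l.foldl (fun acc x => acc + (m - x)) 0 := by
  induction l generalizing a with
  | nil => simp
  | cons x t ih =>
    simp only [List.foldl_cons]
    rw [ih (a + (m - x)), ih (0 + (m - x))]
    ring

-- B computes (sret, some running-max)
theorem alt_fold (l : List Int) :
    l.reverse.foldl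
      (fun (st : Int × Option Int) v =>
        let mx := match st.2 with
          | none => v
          | some m => if v > m then v else m
        (st.1 + (mx - v), some mx))
      (0, none)
    = (sret l, match l with | [] => none | v :: t => some (t.foldl max v)) := by
  induction l with
  | nil => rfl
  | cons v t ih =>
    rw [List.reverse_cons, List.foldl_append, ih]
    cases t with
    | nil => simp [sret, sufMax]
    | cons u t' =>
      have h1 : (if v > t'.foldl max u then v else t'.foldl max u) = max v (t'.foldl max u) := by
        rcases le_or_gt v (t'.foldl max u) with h | h
        · rw [if_neg (not_lt.mpr h), max_eq_right h]
        · rw [if_pos h, max_eq_left (le_of_lt h)]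
      have h2 : t'.foldl max (max v u) = max v (t'.foldl max u) := foldl_max_comm t' v u
      simp only [List.foldl_cons, List.foldl_nil, sret, sufMax, h1, h2, Prod.mk.injEq]
      exact ⟨by ring, trivial⟩

theorem alt_eq_sret (l : List Int) : solution_alt l = sret l := by
  unfold solution_alt
  rw [alt_fold]

-- decomposition of sret at the first index of the maximum
theorem sret_split (value : List Int) (m : Int) (idx : Nat)
    (hi : PySem.List.index? value m = some idx)
    (hle : ∀ y ∈ value, y ≤ m) :
    sret value = (value.take idx).foldl (fun acc x => acc + (m - x)) 0
      + sret (value.drop (idx + 1)) := by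
  induction value generalizing idx with
  | nil => simp [PySem.List.index?] at hi
  | cons v t ih =>
    by_cases hv : v = m
    · subst hv
      rw [PySem.List.index?_cons_self] at hi
      injection hi with h; subst h
      simp only [List.take_zero, List.foldl_nil, List.drop_succ_cons, List.drop_zero, sret, sufMax]
      have : t.foldl max v = v :=
        foldl_max_of_le t v (fun y hy => hle y (by simp [hy]))
      rw [this]; ring
    · rw [PySem.List.index?_cons_of_ne t hv] at hi
      cases hj : PySem.List.index? t m with
      | none => rw [hj] at hi; simp at hi
      | some j =>
        rw [hj] at hi
        simp only [Option.map_some] at hi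
        injection hi with h; subst h
        have hmt : m ∈ t := (PySem.List.index?_isSome_iff t m).mp (by rw [hj]; rfl)
        have hfold : t.foldl max v = m :=
          foldl_max_of_mem t m v hmt (fun y hy => hle y (by simp [hy]))
            (hle v (by simp))
        have iht := ih j hj (fun y hy => hle y (by simp [hy]))
        simp only [sret, sufMax, hfold, List.take_succ_cons, List.foldl_cons,
          List.drop_succ_cons, iht]
        rw [addFold m (t.take j) (0 + (m - v))]
        ring

theorem sumRange_take (value : List Int) (m : Int) (idx : Nat) (h : idx ≤ value.length) (a : Int) :
    (PySem.List.pyRange 0 (idx : Int) 1).foldl (fun acc i => acc + (m - PySem.List.pyGetD value i 0)) a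
    = (value.take idx).foldl (fun acc x => acc + (m - x)) a := by
  have key := PySem.List.foldl_pyRange_zero_pyGetD' (value.take idx) 0
      (fun acc x => acc + (m - x)) a
  have hlen : (((value.take idx).length : Int)) = (idx : Int) := by
    push_cast [List.length_take]; omega
  rw [hlen] at key
  rw [← key]
  apply PySem.List.foldl_congr_mem
  intro acc i hi
  have hmem := PySem.List.mem_pyRange_one.mp hi
  have h0 : 0 ≤ i := hmem.1
  have h1 : i.toNat < idx := by omega
  rw [PySem.List.pyGetD_eq_getElem value 0 h0 (by omega),
      PySem.List.pyGetD_eq_getElem (value.take idx) 0 h0 (by push_cast [List.length_take]; omega)]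
  rw [List.getElem_take]

theorem loop_eq (value : List Int) (a : Int) (hne : value ≠ []) :
    solutionLoop a value = a + sret value := by
  induction hn : value.length using Nat.strong_induction_on generalizing value a with
  | _ n ih =>
  subst hn
  obtain ⟨v, t, rfl⟩ := List.exists_cons_of_ne_nil hne
  rw [solutionLoop]
  split
  next heq =>
    rw [PySem.List.max?_id_cons v t] at heq
    exact absurd heq (by simp)
  next m heq =>
    have hmem : m ∈ v :: t := PySem.List.max?_mem heq
    have hle : ∀ y ∈ v :: t, y ≤ m := PySem.List.max?_isMax heq
    split
    next heq2 =>
      rw [PySem.List.index?_eq_none_iff] at heq2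
      exact absurd hmem heq2
    next idx heq2 =>
      obtain ⟨hlt, hget, _⟩ := PySem.List.getElem_of_index?_eq_some heq2
      have hsplit := sret_split (v :: t) m idx heq2 hle
      by_cases hlast : idx = (v :: t).length - 1
      · rw [if_pos hlast]
        have hdecomp : (v :: t) = (v :: t).take idx ++ [m] := by
          conv_lhs => rw [← List.take_append_drop idx (v :: t)]
          congr 1
          have hlen : ((v :: t).drop idx).length = 1 := by
            rw [List.length_drop]; omega
          cases hd : (v :: t).drop idx with
          | nil => rw [hd] at hlen; simp at hlen
          | cons x s =>
            rw [hd] at hlen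
            simp at hlen
            have hx : x = m := by
              have hg := List.getElem?_drop (xs := v :: t) (i := idx) (j := 0)
              rw [hd] at hg
              simp only [List.getElem?_cons_zero, Nat.add_zero] at hg
              have hm' : (v :: t)[idx]? = some m := by
                rw [List.getElem?_eq_getElem hlt, hget]
              rw [hm'] at hg
              injection hg
            simp [hlen, hx]
        conv_lhs => rw [hdecomp]
        rw [List.foldl_append]
        simp only [List.foldl_cons, List.foldl_nil]
        rw [hsplit]
        have hdrop : (v :: t).drop (idx + 1) = [] := by
          apply List.drop_eq_nil_of_le
          simp at hlast ⊢; omega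
        rw [hdrop]
        rw [addFold m ((v :: t).take idx) a]
        simp [sret]
      · rw [if_neg hlast]
        have hlen2 : idx + 1 < (v :: t).length := by
          simp at hlt hlast ⊢; omega
        by_cases h0 : idx = 0
        · rw [if_pos h0]
          subst h0
          rw [PySem.List.slice_from_one, List.tail_cons]
          have htne : t ≠ [] := by
            intro h; subst h; simp at hlen2
          rw [ih t.length (by simp) t a htne rfl]
          rw [hsplit]
          simp
        · rw [if_neg h0]
          have hcast : ((idx : Int) + 1) = ((idx + 1 : Nat) : Int) := by push_cast; ring
          rw [hcast, PySem.List.slice_from_natCast]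
          have hdne : (v :: t).drop (idx + 1) ≠ [] := by
            rw [← List.length_pos_iff, List.length_drop]
            omega
          rw [ih ((v :: t).drop (idx + 1)).length (by rw [List.length_drop]; omega)
            _ _ hdne rfl]
          rw [sumRange_take (v :: t) m idx (by omega) a]
          rw [hsplit, addFold m ((v :: t).take idx) a]
          ring

-- ===== VERDICT (by name: the statement is the Claim_ definition above) =====
theorem solution_spec : Claim_equal_solution := by
  intro value _ hpre
  unfold Spec_solution solution
  rw [alt_eq_sret, loop_eq value 0 hpre]
  ring
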